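-- pv_equiv track=rewrite | github.com/BrianQcq/LeetCode | src/PureStorage_OA.py | numberScore
-- ===== SOURCE A (Python) =====
-- def numberScore(num):
-- 	res = total = 0
-- 	str_num = str(num)
-- 	for digit in str_num:
-- 		if digit == '7':
-- 			res += 1
-- 		elif int(digit) % 2 == 0:
-- 			res += 4
-- 		total += int(digit)
--
-- 	if total % 3 == 0:
-- 		res += 2
--
-- 	step = 1
-- 	for i in range(len(str_num)-1):
-- 		if int(str_num[i]) != int(str_num[i+1]) + 1:
-- 			if step != 1:
-- 				res += step ** 2
-- 			step = 1
-- 		else: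
-- 			step += 1
-- 	if step != 1:
-- 		res += step ** 2
--
-- 	idx = 0
-- 	for i in range(len(str_num)):
-- 		if str_num[i] == '5':
-- 			idx += 1
-- 		else:
-- 			if idx >= 2:
-- 				res += 3 + 2 * (idx - 2) * 3
-- 				idx = 0
-- 			else:
-- 				idx = 0
-- 	if idx != 0:
-- 		res += 3 + 2 * (idx - 2) * 3
--
--
-- 	return res
-- ===== SOURCE B (Python) =====
-- def numberScore(num):
-- 	res = 0
-- 	total = 0
-- 	step = 1
-- 	idx = 0
-- 	prev = None
-- 	for d in str(num):
-- 		v = int(d)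
-- 		if d == '7':
-- 			res += 1
-- 		elif v % 2 == 0:
-- 			res += 4
-- 		total += v
-- 		if prev is not None:
-- 			if prev != v + 1:
-- 				if step != 1:
-- 					res += step * step
-- 				step = 1
-- 			else:
-- 				step += 1
-- 		if d == '5':
-- 			idx += 1
-- 		else:
-- 			if idx >= 2:
-- 				res += 3 + 2 * (idx - 2) * 3
-- 			idx = 0
-- 		prev = v
-- 	if total % 3 == 0:
-- 		res += 2
-- 	if step != 1:
-- 		res += step * step
-- 	if idx != 0:
-- 		res += 3 + 2 * (idx - 2) * 3
-- 	return res
-- ===== Notes on version B (the rewrite author's own statement) =====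
-- stated objective: alternative
-- what changed: Replaces A's three separate passes over the digit string (digit scoring, descending-run scan over index pairs, run-of-5 scan) by one fused single pass that tracks the previous digit and all three pieces of state (total, step, idx) together.
import Mathlib
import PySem

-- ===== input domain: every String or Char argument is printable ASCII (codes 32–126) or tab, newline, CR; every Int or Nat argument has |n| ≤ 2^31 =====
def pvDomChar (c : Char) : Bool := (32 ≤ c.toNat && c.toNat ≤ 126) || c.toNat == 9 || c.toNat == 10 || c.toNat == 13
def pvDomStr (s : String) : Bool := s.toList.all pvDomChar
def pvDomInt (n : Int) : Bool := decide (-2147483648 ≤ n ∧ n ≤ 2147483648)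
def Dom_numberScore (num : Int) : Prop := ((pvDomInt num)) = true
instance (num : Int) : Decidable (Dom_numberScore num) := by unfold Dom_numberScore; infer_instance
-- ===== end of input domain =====

-- B fuses A's three passes over the digit string into one single pass carrying all state; same values, same cost class.


-- ===== PORT A =====
-- int(digit): exact on the single digit characters '0'..'9' that str(num) yields for num ≥ 0 (Pre_).
def digitVal (c : Char) : Int := (PySem.Int.ofStr? (String.singleton c)).getD 0

-- first for-loop: res/total accumulation over the digits
def aLoop1 : List Char → Int × Int → Int × Int
  | [], s => s
  | d :: rest, (res, total) =>
      let res := if d = '7' then res + 1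
                 else if PySem.Int.mod (digitVal d) 2 = 0 then res + 4 else res
      aLoop1 rest (res, total + digitVal d)

-- second for-loop: 'for i in range(len-1)' compares str_num[i] with str_num[i+1], i.e. adjacent pairs
def aLoop2 : List Char → Int → Int → Int × Int
  | d1 :: d2 :: rest, res, step =>
      if digitVal d1 ≠ digitVal d2 + 1 then
        aLoop2 (d2 :: rest) (if step ≠ 1 then res + step ^ 2 else res) 1
      else
        aLoop2 (d2 :: rest) res (step + 1)
  | _, res, step => (res, step)

-- third for-loop: runs of '5'
def aLoop3 : List Char → Int → Int → Int × Int
  | [], res, idx => (res, idx)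
  | d :: rest, res, idx =>
      if d = '5' then aLoop3 rest res (idx + 1)
      else if idx ≥ 2 then aLoop3 rest (res + 3 + 2 * (idx - 2) * 3) 0
      else aLoop3 rest res 0

def numberScore (num : Int) : Int :=
  let l := (PySem.Int.toStr num).toList
  let p1 := aLoop1 l (0, 0)
  let res1 := if PySem.Int.mod p1.2 3 = 0 then p1.1 + 2 else p1.1
  let p2 := aLoop2 l res1 1
  let res2 := if p2.2 ≠ 1 then p2.1 + p2.2 ^ 2 else p2.1
  let p3 := aLoop3 l res2 0
  if p3.2 ≠ 0 then p3.1 + 3 + 2 * (p3.2 - 2) * 3 else p3.1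

-- ===== PORT B =====
-- single fused pass; state = (res, total, step, idx, prev)
def bLoop : List Char → Int × Int × Int × Int × Option Int → Int × Int × Int × Int × Option Int
  | [], s => s
  | d :: rest, (res, total, step, idx, prev) =>
      let v := digitVal d
      let res := if d = '7' then res + 1
                 else if PySem.Int.mod v 2 = 0 then res + 4 else res
      let total := total + v
      let rs : Int × Int :=
        match prev with
        | none => (res, step)
        | some p =>
            if p ≠ v + 1 then ((if step ≠ 1 then res + step * step else res), 1)
            else (res, step + 1)
      let ri : Int × Int :=
        if d = '5' then (rs.1, idx + 1)
        else ((if idx ≥ 2 then rs.1 + 3 + 2 * (idx - 2) * 3 else rs.1), 0)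
      bLoop rest (ri.1, total, rs.2, ri.2, some v)

def numberScore_alt (num : Int) : Int :=
  let s := (PySem.Int.toStr num).toList
  let st := bLoop s (0, 0, 1, 0, none)
  let res := if PySem.Int.mod st.2.1 3 = 0 then st.1 + 2 else st.1
  let res := if st.2.2.1 ≠ 1 then res + st.2.2.1 * st.2.2.1 else res
  if st.2.2.2.1 ≠ 0 then res + 3 + 2 * (st.2.2.2.1 - 2) * 3 else res

-- ===== PRECONDITION & SPEC =====
-- Pre_ excludes negative num: there str(num) starts with '-' and int('-') raises ValueError in A (and in B).
def Pre_numberScore (num : Int) : Prop := 0 ≤ num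
instance (num : Int) : Decidable (Pre_numberScore num) := by unfold Pre_numberScore; infer_instance
def pvWitness_numberScore : Int := 7654

def Spec_numberScore (num : Int) (out : Int) : Prop := out = numberScore_alt num
instance (num : Int) (out : Int) : Decidable (Spec_numberScore num out) := by unfold Spec_numberScore; infer_instance

-- ===== CLAIM (what is proved, stated in full; the proofs are below) =====
def Claim_equal_numberScore : Prop := ∀ (num : Int), Dom_numberScore num → Pre_numberScore num → Spec_numberScore num (numberScore num)

-- ===== LEMMAS AND PROOFS =====

-- proof-side helpers: the per-concern contributions of one pass over the digits
def f1 : List Char → Int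
  | [] => 0
  | d :: r => (if d = '7' then 1 else if PySem.Int.mod (digitVal d) 2 = 0 then 4 else 0) + f1 r

def g1 : List Char → Int
  | [] => 0
  | d :: r => digitVal d + g1 r

def e2 : Int → Int → List Char → Int × Int
  | _, step, [] => (0, step)
  | p, step, d :: r =>
      if p ≠ digitVal d + 1 then
        ((if step ≠ 1 then step ^ 2 else 0) + (e2 (digitVal d) 1 r).1, (e2 (digitVal d) 1 r).2)
      else e2 (digitVal d) (step + 1) r

def e3 : Int → List Char → Int × Int
  | idx, [] => (0, idx)
  | idx, d :: r =>
      if d = '5' then e3 (idx + 1) r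
      else ((if idx ≥ 2 then 3 + 2 * (idx - 2) * 3 else 0) + (e3 0 r).1, (e3 0 r).2)

def lastv : Int → List Char → Int
  | p, [] => p
  | _, d :: r => lastv (digitVal d) r

-- 'a2 p l' is aLoop2 running over l with p as the (already consumed) previous digit value.
def a2 : Int → List Char → Int → Int → Int × Int
  | _, [], res, step => (res, step)
  | p, d :: rest, res, step =>
      if p ≠ digitVal d + 1 then
        a2 (digitVal d) rest (if step ≠ 1 then res + step ^ 2 else res) 1
      else
        a2 (digitVal d) rest res (step + 1)

theorem aLoop2_eq_a2 (d : Char) (l : List Char) (res step : Int) :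
    aLoop2 (d :: l) res step = a2 (digitVal d) l res step := by
  induction l generalizing d res step with
  | nil => rfl
  | cons e rest ih =>
      simp only [aLoop2, a2]
      split_ifs <;> exact ih e _ _

theorem aLoop1_split (l : List Char) (res total : Int) :
    aLoop1 l (res, total) = (res + f1 l, total + g1 l) := by
  induction l generalizing res total with
  | nil => simp [aLoop1, f1, g1]
  | cons d rest ih =>
      simp only [aLoop1, f1, g1]
      rw [ih]
      split_ifs <;> simp only [Prod.mk.injEq] <;> and_intros <;> first | rfl | ring

theorem a2_split (p : Int) (l : List Char) (res step : Int) :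
    a2 p l res step = (res + (e2 p step l).1, (e2 p step l).2) := by
  induction l generalizing p res step with
  | nil => simp [a2, e2]
  | cons d rest ih =>
      simp only [a2, e2]
      split_ifs <;> rw [ih] <;> simp only [Prod.mk.injEq] <;> and_intros <;>
        first | rfl | ring | trivial

theorem aLoop3_split (l : List Char) (res idx : Int) :
    aLoop3 l res idx = (res + (e3 idx l).1, (e3 idx l).2) := by
  induction l generalizing res idx with
  | nil => simp [aLoop3, e3]
  | cons d rest ih =>
      simp only [aLoop3, e3]
      split_ifs <;> rw [ih] <;> simp only [Prod.mk.injEq] <;> and_intros <;>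
        first | rfl | ring | trivial

-- the fused loop splits into the three independent contributions
theorem bLoop_split (l : List Char) (p res total step idx : Int) :
    bLoop l (res, total, step, idx, some p) =
      (res + f1 l + (e2 p step l).1 + (e3 idx l).1,
       total + g1 l, (e2 p step l).2, (e3 idx l).2, some (lastv p l)) := by
  induction l generalizing p res total step idx with
  | nil => simp [bLoop, f1, g1, e2, e3, lastv]
  | cons d rest ih =>
      simp only [bLoop, f1, g1, e2, e3, lastv]
      split_ifs <;> rw [ih] <;> simp only [Prod.mk.injEq] <;> and_intros <;>
        first | rfl | ring | trivial

set_option maxHeartbeats 1600000 in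
theorem numberScore_eq_alt (num : Int) : numberScore num = numberScore_alt num := by
  unfold numberScore numberScore_alt
  cases hl : (PySem.Int.toStr num).toList with
  | nil => simp [aLoop1, aLoop2, aLoop3, bLoop]
  | cons d rest =>
      simp only [bLoop, aLoop2_eq_a2, aLoop1_split, a2_split, aLoop3_split]
      rw [bLoop_split]
      simp only [f1, g1, e3]
      simp only [zero_add, add_assoc]
      split_ifs <;> first | rfl | ring

-- ===== VERDICT (by name: the statement is the Claim_ definition above) =====
theorem numberScore_spec : Claim_equal_numberScore := by
  intro num _ _
  unfold Spec_numberScore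
  exact numberScore_eq_alt num
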